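-- pv_equiv track=rewrite | github.com/Sougata2/edabitquestions | function.py | min_product
-- ===== SOURCE A (Python) =====
-- def min_product(lst):
--     lst.sort()
--     lst = lst[::-1]
--     l = 0
--     r = len(lst) - 1
--     min_prod = 100000
--     while l < len(lst) - 2:
--         for i in range(l + 1, r):
--             min_prod = min(min_prod, lst[l] * lst[i] * lst[r])
--         l += 1
--     return min_prod
-- ===== SOURCE B (Python) =====
-- def min_product(lst):
--     # One pass after sorting: the fixed factor is the minimum element; the best
--     # partner pair for each y among earlier candidates is always the running
--     # min or max (the product is linear in the partner), so no pair scan needed.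
--     lst.sort()  # same in-place sort as the original
--     if len(lst) < 3:
--         return 100000
--     m = lst[0]
--     best = 100000
--     mn = mx = lst[1]
--     for y in lst[2:]:
--         best = min(best, m * mn * y, m * mx * y)
--         mn = min(mn, y)
--         mx = max(mx, y)
--     return best
-- ===== Notes on version B (the rewrite author's own statement) =====
-- stated objective: faster
-- what changed: Replaced the quadratic scan over all index pairs by a single linear pass (after the same sort) that keeps a running min and max of the seen candidates, using that the triple product is linear in the partner element so only extreme partners can be optimal.
import Mathlib
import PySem

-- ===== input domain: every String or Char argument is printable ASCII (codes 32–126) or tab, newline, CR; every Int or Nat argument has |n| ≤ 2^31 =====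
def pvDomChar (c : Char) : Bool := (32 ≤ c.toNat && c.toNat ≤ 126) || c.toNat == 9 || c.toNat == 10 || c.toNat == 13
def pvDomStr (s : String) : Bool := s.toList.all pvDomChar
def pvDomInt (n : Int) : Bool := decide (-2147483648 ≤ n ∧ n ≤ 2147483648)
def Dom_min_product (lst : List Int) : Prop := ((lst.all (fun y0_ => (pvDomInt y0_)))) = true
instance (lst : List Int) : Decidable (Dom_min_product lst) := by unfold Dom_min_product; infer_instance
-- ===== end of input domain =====

-- B replaces A's quadratic all-pairs scan by one linear pass with a running min/max
-- after the same in-place sort (return-value equivalence; both sort the argument).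

-- ===== PORT A =====
def min_product (lst : List Int) : Int :=
  let s := PySem.List.sorted lst (fun x => x) false          -- lst.sort()
  let d := (PySem.List.slice? s none none (-1)).getD []      -- lst = lst[::-1] (step ≠ 0, never raises)
  let r : Int := (d.length : Int) - 1
  -- while l < len(lst) - 2, l starting at 0 and incremented by 1 each turn
  (PySem.List.pyRange 0 ((d.length : Int) - 2) 1).foldl
    (fun mp l =>
      (PySem.List.pyRange (l + 1) r 1).foldl
        (fun mp i =>
          min mp (PySem.List.pyGetD d l 0 * PySem.List.pyGetD d i 0 * PySem.List.pyGetD d r 0))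
        mp)
    100000

-- ===== PORT B =====
-- B-side helper: one loop step of Source B (update best against the running min/max partners)
def bstep (m : Int) (st : Int × Int × Int) (y : Int) : Int × Int × Int :=
  (min (min st.1 (m * st.2.1 * y)) (m * st.2.2 * y), min st.2.1 y, max st.2.2 y)

def min_product_alt (lst : List Int) : Int :=
  let s := PySem.List.sorted lst (fun x => x) false          -- lst.sort()
  if s.length < 3 then 100000
  else
    match s with
    | m :: a :: rest => (rest.foldl (bstep m) (100000, a, a)).1
    | _ => 100000    -- unreachable: length ≥ 3

-- ===== PRECONDITION & SPEC =====
def Spec_min_product (lst : List Int) (out : Int) : Prop := out = min_product_alt lst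
instance (lst : List Int) (out : Int) : Decidable (Spec_min_product lst out) := by unfold Spec_min_product; infer_instance

-- ===== CLAIM (what is proved, stated in full; the proofs are below) =====
def Claim_equal_min_product : Prop := ∀ (lst : List Int), Dom_min_product lst → Spec_min_product lst (min_product lst)

-- ===== LEMMAS AND PROOFS =====

-- the list of products m*x*y for pairs: x from p (earlier candidates) with each later y of ys
def PP (m : Int) : List Int → List Int → List Int
  | _, [] => []
  | p, y :: t => p.map (fun x => m * x * y) ++ PP m (p ++ [y]) t

theorem foldl_min_le_init (L : List Int) (b : Int) : L.foldl min b ≤ b := by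
  induction L generalizing b with
  | nil => simp
  | cons x t ih => exact le_trans (ih _) (min_le_left _ _)

theorem foldl_min_le_mem {L : List Int} {x : Int} (h : x ∈ L) (b : Int) : L.foldl min b ≤ x := by
  induction L generalizing b with
  | nil => cases h
  | cons y t ih =>
    simp only [List.foldl_cons]
    rcases List.mem_cons.1 h with rfl | hx
    · exact le_trans (foldl_min_le_init t _) (min_le_right _ _)
    · exact ih hx _
  
theorem le_foldl_min {L : List Int} {b c : Int} (hb : c ≤ b) (h : ∀ x ∈ L, c ≤ x) :
    c ≤ L.foldl min b := by
  induction L generalizing b with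
  | nil => exact hb
  | cons y t ih =>
    exact ih (le_min hb (h y (List.mem_cons_self))) (fun x hx => h x (List.mem_cons_of_mem _ hx))

theorem foldl_min_eq_of_mem_iff {L1 L2 : List Int} (h : ∀ z, z ∈ L1 ↔ z ∈ L2) (b : Int) :
    L1.foldl min b = L2.foldl min b := by
  apply le_antisymm
  · exact le_foldl_min (foldl_min_le_init _ _) (fun x hx => foldl_min_le_mem ((h x).2 hx) _)
  · exact le_foldl_min (foldl_min_le_init _ _) (fun x hx => foldl_min_le_mem ((h x).1 hx) _)

theorem min_linear {m y mn mx x : Int} (h1 : mn ≤ x) (h2 : x ≤ mx) :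
    min (m * mn * y) (m * mx * y) ≤ m * x * y := by
  rcases le_total 0 (m * y) with h | h
  · exact le_trans (min_le_left _ _) (by nlinarith)
  · exact le_trans (min_le_right _ _) (by nlinarith)

theorem keyB {m y mn mx : Int} {p : List Int} (hmn : mn ∈ p) (hmx : mx ∈ p)
    (hb : ∀ x ∈ p, mn ≤ x ∧ x ≤ mx) (b : Int) :
    (p.map (fun x => m * x * y)).foldl min b = min (min b (m * mn * y)) (m * mx * y) := by
  apply le_antisymm
  · exact le_min (le_min (foldl_min_le_init _ _)
      (foldl_min_le_mem (List.mem_map_of_mem hmn) _))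
      (foldl_min_le_mem (List.mem_map_of_mem hmx) _)
  · refine le_foldl_min (le_trans (min_le_left _ _) (min_le_left _ _)) ?_
    rintro z hz
    obtain ⟨x, hx, rfl⟩ := List.mem_map.1 hz
    calc min (min b (m * mn * y)) (m * mx * y)
        ≤ min (m * mn * y) (m * mx * y) := by
          exact le_min (le_trans (min_le_left _ _) (min_le_right _ _)) (min_le_right _ _)
      _ ≤ m * x * y := min_linear (hb x hx).1 (hb x hx).2

theorem Bloop (m : Int) : ∀ (ys p : List Int) (b mn mx : Int), mn ∈ p → mx ∈ p →
    (∀ x ∈ p, mn ≤ x ∧ x ≤ mx) →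
    (ys.foldl (bstep m) (b, mn, mx)).1 = (PP m p ys).foldl min b := by
  intro ys
  induction ys with
  | nil => intro p b mn mx _ _ _; simp [PP]
  | cons y t ih =>
    intro p b mn mx hmn hmx hb
    have hmn' : min mn y ∈ p ++ [y] := by
      rcases min_choice mn y with h | h <;> rw [h] <;> simp [hmn]
    have hmx' : max mx y ∈ p ++ [y] := by
      rcases max_choice mx y with h | h <;> rw [h] <;> simp [hmx]
    have hb' : ∀ x ∈ p ++ [y], min mn y ≤ x ∧ x ≤ max mx y := by
      intro x hx
      rcases List.mem_append.1 hx with hx | hx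
      · exact ⟨le_trans (min_le_left _ _) (hb x hx).1, le_trans (hb x hx).2 (le_max_left _ _)⟩
      · simp only [List.mem_singleton] at hx; subst hx
        exact ⟨min_le_right _ _, le_max_right _ _⟩
    show (t.foldl (bstep m) (bstep m (b, mn, mx) y)).1 = _
    rw [PP, List.foldl_append, keyB hmn hmx hb]
    exact ih (p ++ [y]) _ _ _ hmn' hmx' hb'

theorem foldl_foldl_flatMap {α β : Type} (xs : List α) (g : α → List β)
    (f : Int → β → Int) (init : Int) :
    xs.foldl (fun acc x => (g x).foldl f acc) init = (xs.flatMap g).foldl f init := by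
  induction xs generalizing init with
  | nil => simp
  | cons x t ih => simp [List.foldl_append, ih]

-- membership in PP
theorem PP_mem (m : Int) : ∀ (ys p : List Int) (z : Int),
    z ∈ PP m p ys ↔ ∃ k, k < ys.length ∧ ∃ x, x ∈ p ++ ys.take k ∧ z = m * x * ys.getD k 0 := by
  intro ys
  induction ys with
  | nil => intro p z; simp [PP]
  | cons y t ih =>
    intro p z
    rw [PP, List.mem_append, ih]
    constructor
    · rintro (hz | ⟨k, hk, x, hx, rfl⟩)
      · obtain ⟨x, hx, rfl⟩ := List.mem_map.1 hz
        exact ⟨0, by simp, x, by simpa using hx, by simp⟩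
      · refine ⟨k + 1, by simpa using hk, x, ?_, by simp⟩
        simpa [List.append_assoc] using hx
    · rintro ⟨k, hk, x, hx, rfl⟩
      cases k with
      | zero =>
        left; simp only [List.take_zero, List.append_nil] at hx
        exact List.mem_map.2 ⟨x, hx, by simp⟩
      | succ j =>
        right
        exact ⟨j, by simpa using hk, x, by simpa [List.append_assoc] using hx, by simp⟩

-- pair-index form of PP membership for the pool a :: rest
theorem getD_reverse (s : List Int) (k : Nat) (hk : k < s.length) :
    s.reverse.getD k 0 = s.getD (s.length - 1 - k) 0 := by
  rw [List.getD_eq_getElem _ _ (by simpa using hk), List.getD_eq_getElem _ _ (by omega),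
    List.getElem_reverse]

theorem dget (s : List Int) (j : Int) (h0 : 0 ≤ j) (h1 : j.toNat < s.length) :
    PySem.List.pyGetD s.reverse j 0 = s.getD (s.length - 1 - j.toNat) 0 := by
  have hj : j = ((j.toNat : Nat) : Int) := (Int.toNat_of_nonneg h0).symm
  conv_lhs => rw [hj]
  rw [PySem.List.pyGetD_natCast, getD_reverse s j.toNat h1]

theorem PP_mem_pool (m a : Int) (rest : List Int) (z : Int) :
    z ∈ PP m [a] rest ↔ ∃ u v, u < v ∧ v < (a :: rest).length ∧
      z = m * (a :: rest).getD u 0 * (a :: rest).getD v 0 := by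
  rw [PP_mem]
  constructor
  · rintro ⟨k, hk, x, hx, rfl⟩
    have hx' : x ∈ (a :: rest).take (k + 1) := by simpa [List.take_succ_cons] using hx
    obtain ⟨u, hu, rfl⟩ := List.mem_take_iff_getElem.1 hx'
    have hu' : u < (a :: rest).length := lt_of_lt_of_le hu (min_le_right _ _)
    have hk1 : k + 1 < (a :: rest).length := by simp only [List.length_cons]; omega
    refine ⟨u, k + 1, by omega, hk1, ?_⟩
    rw [List.getD_eq_getElem _ _ hu', List.getD_eq_getElem _ _ hk1,
      List.getD_eq_getElem _ _ hk, List.getElem_cons_succ]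
  · rintro ⟨u, v, huv, hv, rfl⟩
    simp only [List.length_cons] at hv
    have hu' : u < (a :: rest).length := by simp only [List.length_cons]; omega
    have hvk : v - 1 < rest.length := by omega
    refine ⟨v - 1, hvk, (a :: rest).getD u 0, ?_, ?_⟩
    · rw [List.getD_eq_getElem _ _ hu']
      have hmem : (a :: rest)[u] ∈ (a :: rest).take (v - 1 + 1) :=
        List.mem_take_iff_getElem.2 ⟨u, by simp only [List.length_cons, lt_min_iff]; omega, rfl⟩
      simpa [List.take_succ_cons] using hmem
    · have h : rest.getD (v - 1) 0 = (a :: rest).getD v 0 := by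
        rw [← List.getD_cons_succ (x := a) (d := (0 : Int))]
        congr 1
        omega
      rw [h]

-- membership in the explicit product list of A's double loop
theorem mem_PA_iff (m a c : Int) (t : List Int) (z : Int) :
    (z ∈ (PySem.List.pyRange 0 (((m :: a :: c :: t).length : Int) - 2) 1).flatMap
      (fun l => (PySem.List.pyRange (l + 1) (((m :: a :: c :: t).length : Int) - 1) 1).map
        (fun i => PySem.List.pyGetD (m :: a :: c :: t).reverse l 0 *
                  PySem.List.pyGetD (m :: a :: c :: t).reverse i 0 *
                  PySem.List.pyGetD (m :: a :: c :: t).reverse (((m :: a :: c :: t).length : Int) - 1) 0)))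
    ↔ z ∈ PP m [a] (c :: t) := by
  have hn : (m :: a :: c :: t).length = t.length + 3 := by simp
  have e3 : PySem.List.pyGetD (m :: a :: c :: t).reverse (((m :: a :: c :: t).length : Int) - 1) 0 = m := by
    have h : ((m :: a :: c :: t).length : Int) - 1 = (((m :: a :: c :: t).length - 1 : Nat) : Int) := by
      rw [hn]; omega
    rw [h, PySem.List.pyGetD_natCast,
      getD_reverse _ _ (by simp only [List.length_cons]; omega)]
    simp
  have edx : ∀ j : Int, 0 ≤ j → j < ((m :: a :: c :: t).length : Int) - 1 →
      PySem.List.pyGetD (m :: a :: c :: t).reverse j 0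
        = (a :: c :: t).getD (t.length + 1 - j.toNat) 0 := by
    intro j h0 h1
    rw [hn] at h1
    rw [dget _ j h0 (by rw [hn]; omega)]
    have h2 : (m :: a :: c :: t).length - 1 - j.toNat = (t.length + 1 - j.toNat) + 1 := by
      rw [hn]; omega
    rw [h2, List.getD_cons_succ]
  rw [PP_mem_pool]
  simp only [List.mem_flatMap, List.mem_map, PySem.List.mem_pyRange_one]
  constructor
  · rintro ⟨l, ⟨hl0, hl1⟩, i, ⟨hi0, hi1⟩, rfl⟩
    rw [hn] at hl1 hi1
    refine ⟨t.length + 1 - i.toNat, t.length + 1 - l.toNat, by omega,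
      by simp only [List.length_cons]; omega, ?_⟩
    rw [edx l hl0 (by rw [hn]; omega), edx i (by omega) (by rw [hn]; omega), e3]
    ring
  · rintro ⟨u, v, huv, hv, rfl⟩
    simp only [List.length_cons] at hv
    refine ⟨((t.length + 1 - v : Nat) : Int), ⟨by omega, by rw [hn]; omega⟩,
      ((t.length + 1 - u : Nat) : Int), ⟨by omega, by rw [hn]; omega⟩, ?_⟩
    rw [edx ((t.length + 1 - v : Nat) : Int) (by omega) (by rw [hn]; omega),
      edx ((t.length + 1 - u : Nat) : Int) (by omega) (by rw [hn]; omega), e3]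
    have h1 : t.length + 1 - ((t.length + 1 - v : Nat) : Int).toNat = v := by omega
    have h2 : t.length + 1 - ((t.length + 1 - u : Nat) : Int).toNat = u := by omega
    rw [h1, h2]
    ring

theorem A_eq_B (lst : List Int) : min_product lst = min_product_alt lst := by
  unfold min_product min_product_alt
  simp only [PySem.List.slice?_none_none_neg_one, Option.getD_some, List.length_reverse]
  generalize PySem.List.sorted lst (fun x => x) false = s
  cases s with
  | nil => rw [PySem.List.pyRange_one_eq_nil (by simp only [List.length_nil]; omega)]; simp
  | cons m s1 =>
  cases s1 with
  | nil => rw [PySem.List.pyRange_one_eq_nil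
      (by simp only [List.length_cons, List.length_nil]; omega)]; simp
  | cons a s2 =>
  cases s2 with
  | nil => rw [PySem.List.pyRange_one_eq_nil
      (by simp only [List.length_cons, List.length_nil]; omega)]; simp
  | cons c t =>
    have hB : ¬ (m :: a :: c :: t).length < 3 := by simp
    rw [if_neg hB]
    -- A side: reshape the nested min-folds into one min-fold over a flatMap
    have h1 : ∀ (mp l : Int),
        (PySem.List.pyRange (l + 1) (((m :: a :: c :: t).length : Int) - 1) 1).foldl
          (fun mp i => min mp (PySem.List.pyGetD (m :: a :: c :: t).reverse l 0 *
            PySem.List.pyGetD (m :: a :: c :: t).reverse i 0 *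
            PySem.List.pyGetD (m :: a :: c :: t).reverse (((m :: a :: c :: t).length : Int) - 1) 0)) mp
        = ((PySem.List.pyRange (l + 1) (((m :: a :: c :: t).length : Int) - 1) 1).map
            (fun i => PySem.List.pyGetD (m :: a :: c :: t).reverse l 0 *
              PySem.List.pyGetD (m :: a :: c :: t).reverse i 0 *
              PySem.List.pyGetD (m :: a :: c :: t).reverse (((m :: a :: c :: t).length : Int) - 1) 0)).foldl min mp := by
      intro mp l; rw [List.foldl_map]
    simp only [h1]
    rw [foldl_foldl_flatMap]
    -- B side: the running min/max loop equals the min-fold of the pair-product list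
    have hBloop : ((c :: t).foldl (bstep m) (100000, a, a)).1
        = (PP m [a] (c :: t)).foldl min 100000 :=
      Bloop m (c :: t) [a] 100000 a a (by simp) (by simp)
        (by intro x hx; simp only [List.mem_singleton] at hx; subst hx
            exact ⟨le_refl _, le_refl _⟩)
    exact (foldl_min_eq_of_mem_iff (mem_PA_iff m a c t) 100000).trans hBloop.symm

-- ===== VERDICT (by name: the statement is the Claim_ definition above) =====
theorem min_product_spec : Claim_equal_min_product := by
  intro lst _
  unfold Spec_min_product
  exact A_eq_B lst
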